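-- pv_equiv track=rewrite | github.com/vanbuncha/aoc2024 | 02/02.py | check_level_two
-- ===== SOURCE A (Python) =====
-- def check_level_two(level):
--     count = 0
--     for i in range(len(level)):
--         new_level = level[:i] + level[i + 1 :]
--
--         is_increasing = all(
--             new_level[j] < new_level[j + 1] for j in range(len(new_level) - 1)
--         )
--
--         is_decreasing = all(
--             new_level[j] > new_level[j + 1] for j in range(len(new_level) - 1)
--         )
--
--         valid_range = all(
--             1 <= abs(new_level[j] - new_level[j + 1]) <= 3
--             for j in range(len(new_level) - 1)
--         )
--
--         if (is_increasing or is_decreasing) and valid_range: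
--             count += 1
--
--     return count
-- ===== SOURCE B (Python) =====
-- def _prefixes(good):
--     # out[i] = all(good[:i])  (length len(good)+1)
--     out = [True]
--     acc = True
--     for g in good:
--         acc = acc and g
--         out.append(acc)
--     return out
--
--
-- def _count_dir(level, s, count):
--     # add to `count` the removal indices i for which level-without-i is
--     # strictly monotone in direction s (s=1 increasing, s=-1 decreasing)
--     # with every step between 1 and 3
--     n = len(level)
--     good = [1 <= s * (level[j + 1] - level[j]) <= 3 for j in range(n - 1)]
--     pref = _prefixes(good)         # pref[i]: the first i pairs are good
--     suf = _prefixes(good[::-1])    # suf[k]: the last k pairs are good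
--     if suf[n - 2]:                 # remove index 0
--         count += 1
--     if pref[n - 2]:                # remove index n-1
--         count += 1
--     for i in range(1, n - 1):      # remove a middle index i
--         if pref[i - 1] and suf[n - 2 - i] and 1 <= s * (level[i + 1] - level[i - 1]) <= 3:
--             count += 1
--     return count
--
--
-- def check_level_two(level):
--     n = len(level)
--     if n <= 2:
--         return n  # removing any element leaves at most one value: always safe
--     count = 0
--     for s in (1, -1):
--         count = _count_dir(level, s, count)
--     return count
-- ===== Notes on version B (the rewrite author's own statement) =====
-- stated objective: faster
-- what changed: A rebuilds the n-1-element list for every removal index and rescans it three times (O(n^2)); B computes the good-pair flags once and prefix/suffix all-good run arrays, answering each removal index with two array lookups plus one bridge-pair test (O(n)).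
import Mathlib
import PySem

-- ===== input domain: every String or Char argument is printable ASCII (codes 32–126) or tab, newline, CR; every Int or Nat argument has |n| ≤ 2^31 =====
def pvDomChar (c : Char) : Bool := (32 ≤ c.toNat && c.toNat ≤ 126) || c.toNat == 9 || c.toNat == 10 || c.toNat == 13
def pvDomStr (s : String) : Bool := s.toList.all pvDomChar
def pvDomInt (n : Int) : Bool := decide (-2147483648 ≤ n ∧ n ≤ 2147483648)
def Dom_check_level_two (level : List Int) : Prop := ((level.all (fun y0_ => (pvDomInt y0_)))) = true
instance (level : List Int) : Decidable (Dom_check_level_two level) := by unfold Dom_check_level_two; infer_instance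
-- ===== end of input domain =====

-- B replaces A's O(n^2) re-scan of every deleted copy by O(n) prefix/suffix arrays of good adjacent pairs (O(1) check per removal index); return values proved identical.

-- ===== PORT A =====
def check_level_two (level : List Int) : Int :=
  (PySem.List.pyRange 0 (PySem.List.len level) 1).foldl (fun count i =>
    let new_level := PySem.List.slice level none (some i) ++ PySem.List.slice level (some (i + 1)) none
    let is_increasing := (PySem.List.pyRange 0 (PySem.List.len new_level - 1) 1).all
      (fun j => decide (PySem.List.pyGetD new_level j 0 < PySem.List.pyGetD new_level (j + 1) 0))
    let is_decreasing := (PySem.List.pyRange 0 (PySem.List.len new_level - 1) 1).all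
      (fun j => decide (PySem.List.pyGetD new_level j 0 > PySem.List.pyGetD new_level (j + 1) 0))
    let valid_range := (PySem.List.pyRange 0 (PySem.List.len new_level - 1) 1).all
      (fun j => decide (1 ≤ |PySem.List.pyGetD new_level j 0 - PySem.List.pyGetD new_level (j + 1) 0| ∧
                        |PySem.List.pyGetD new_level j 0 - PySem.List.pyGetD new_level (j + 1) 0| ≤ 3))
    if (is_increasing || is_decreasing) && valid_range then count + 1 else count) 0

-- ===== PORT B =====
-- _prefixes(good): the fold carries (out, acc) exactly as the Python loop does
def pvPrefixes (good : List Bool) : List Bool :=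
  (good.foldl (fun st g => (st.1 ++ [st.2 && g], st.2 && g)) ([true], true)).1

-- _count_dir(level, s, count); good[::-1] is slice? with step -1, which never fails (.getD [] is unreachable)
def pvCountDir (level : List Int) (s : Int) (count : Int) : Int :=
  let n := PySem.List.len level
  let good := (PySem.List.pyRange 0 (n - 1) 1).map
    (fun j => decide (1 ≤ s * (PySem.List.pyGetD level (j + 1) 0 - PySem.List.pyGetD level j 0) ∧
                      s * (PySem.List.pyGetD level (j + 1) 0 - PySem.List.pyGetD level j 0) ≤ 3))
  let pref := pvPrefixes good
  let suf := pvPrefixes ((PySem.List.slice? good none none (-1)).getD [])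
  let count := if PySem.List.pyGetD suf (n - 2) false then count + 1 else count
  let count := if PySem.List.pyGetD pref (n - 2) false then count + 1 else count
  (PySem.List.pyRange 1 (n - 1) 1).foldl (fun count i =>
    if PySem.List.pyGetD pref (i - 1) false && PySem.List.pyGetD suf (n - 2 - i) false &&
       decide (1 ≤ s * (PySem.List.pyGetD level (i + 1) 0 - PySem.List.pyGetD level (i - 1) 0) ∧
               s * (PySem.List.pyGetD level (i + 1) 0 - PySem.List.pyGetD level (i - 1) 0) ≤ 3)
    then count + 1 else count) count

def check_level_two_alt (level : List Int) : Int :=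
  let n := PySem.List.len level
  if n ≤ 2 then n
  else ([1, -1] : List Int).foldl (fun count s => pvCountDir level s count) 0

-- ===== PRECONDITION & SPEC =====
def Spec_check_level_two (level : List Int) (out : Int) : Prop := out = check_level_two_alt level
instance (level : List Int) (out : Int) : Decidable (Spec_check_level_two level out) := by unfold Spec_check_level_two; infer_instance

-- ===== CLAIM (what is proved, stated in full; the proofs are below) =====
def Claim_equal_check_level_two : Prop := ∀ (level : List Int), Dom_check_level_two level → Spec_check_level_two level (check_level_two level)

-- ===== LEMMAS AND PROOFS =====

-- the "safe step" relation in direction s, the list after removing index i, and the per-index goal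
abbrev pvR (s a b : Int) : Prop := 1 ≤ s * (b - a) ∧ s * (b - a) ≤ 3
def pvRem (xs : List Int) (i : Nat) : List Int := xs.take i ++ xs.drop (i + 1)
abbrev pvC (s : Int) (xs : List Int) (i : Nat) : Prop := List.IsChain (pvR s) (pvRem xs i)

lemma pvAll_id_iff (l : List Bool) : l.all id = true ↔ ∀ (i : Nat) (h : i < l.length), l[i] = true := by
  rw [List.all_eq_true]
  constructor
  · intro h i hi; exact h _ (l.getElem_mem hi)
  · rintro h x hx
    obtain ⟨i, hi, rfl⟩ := List.mem_iff_getElem.1 hx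
    exact h i hi

lemma pvCountP_or (l : List Nat) (p q : Nat → Prop) [DecidablePred p] [DecidablePred q]
    (h : ∀ x ∈ l, ¬(p x ∧ q x)) :
    l.countP (fun x => decide (p x ∨ q x))
      = l.countP (fun x => decide (p x)) + l.countP (fun x => decide (q x)) := by
  induction l with
  | nil => simp
  | cons a l ih =>
    simp only [List.countP_cons, List.mem_cons] at *
    have ha := h a (Or.inl rfl)
    rw [ih (fun x hx => h x (Or.inr hx))]
    by_cases hp : p a <;> by_cases hq : q a <;> simp [hp, hq] at * <;> omega

lemma pvC_small (s : Int) (xs : List Int) (h : xs.length ≤ 2) (i : Nat) (hi : i < xs.length) : pvC s xs i := by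
  show List.IsChain _ _
  rw [List.isChain_iff_getElem]
  intro j hj
  simp only [pvRem, List.length_append, List.length_take, List.length_drop] at hj
  omega

lemma pvC_not_both (level : List Int) (h3 : 3 ≤ level.length) (i : Nat) (hi : i < level.length) :
    ¬ (pvC 1 level i ∧ pvC (-1) level i) := by
  rintro ⟨h1, h2⟩
  rw [show pvC 1 level i = List.IsChain (pvR 1) (pvRem level i) from rfl, List.isChain_iff_getElem] at h1
  rw [show pvC (-1) level i = List.IsChain (pvR (-1)) (pvRem level i) from rfl, List.isChain_iff_getElem] at h2
  have hl : (pvRem level i).length = level.length - 1 := by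
    simp only [pvRem, List.length_append, List.length_take, List.length_drop]; omega
  have hlt : 0 + 1 < (pvRem level i).length := by omega
  have e1 := h1 0 hlt
  have e2 := h2 0 hlt
  simp only [pvR, one_mul, neg_mul] at e1 e2
  omega

def pvGd (s : Int) (xs : List Int) : List Bool :=
  (List.range (xs.length - 1)).map (fun j => decide (pvR s (xs.getD j 0) (xs.getD (j + 1) 0)))

lemma pvC_zero (s : Int) (xs : List Int) : pvC s xs 0 ↔ List.IsChain (pvR s) (xs.drop 1) := by
  show List.IsChain _ _ ↔ _
  simp [pvRem]

lemma pvC_last (s : Int) (xs : List Int) (h : 1 ≤ xs.length) :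
    pvC s xs (xs.length - 1) ↔ List.IsChain (pvR s) (xs.take (xs.length - 1)) := by
  show List.IsChain _ _ ↔ _
  have : xs.length - 1 + 1 = xs.length := by omega
  rw [pvRem, this, List.drop_length, List.append_nil]

lemma pvC_mid (s : Int) (xs : List Int) (i : Nat) (h1 : 1 ≤ i) (h2 : i + 1 ≤ xs.length - 1) :
    pvC s xs i ↔ (List.IsChain (pvR s) (xs.take i) ∧ List.IsChain (pvR s) (xs.drop (i + 1)) ∧
                   pvR s (xs.getD (i - 1) 0) (xs.getD (i + 1) 0)) := by
  show List.IsChain _ _ ↔ _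
  rw [pvRem, List.isChain_append]
  have hlast : (xs.take i).getLast? = some (xs.getD (i - 1) 0) := by
    rw [List.getLast?_eq_getElem?, List.getElem?_take]
    have hlen : (List.take i xs).length = i := by rw [List.length_take]; omega
    rw [hlen]
    have : i - 1 < i := by omega
    rw [if_pos this, List.getElem?_eq_getElem (by omega), List.getD_eq_getElem _ _ (by omega)]
  have hhead : (xs.drop (i + 1)).head? = some (xs.getD (i + 1) 0) := by
    rw [List.head?_eq_getElem?, List.getElem?_drop, Nat.add_zero,
        List.getElem?_eq_getElem (by omega), List.getD_eq_getElem _ _ (by omega)]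
  rw [hlast, hhead]
  simp

lemma pvGd_getElem (s : Int) (xs : List Int) (j : Nat) (hj : j < xs.length - 1)
    (hj' : j < (pvGd s xs).length) :
    (pvGd s xs)[j] = decide (pvR s (xs[j]'(by omega)) (xs[j + 1]'(by omega))) := by
  simp only [pvGd, List.getElem_map, List.getElem_range]
  rw [List.getD_eq_getElem _ _ (by omega), List.getD_eq_getElem _ _ (by omega)]

lemma pvGd_length (s : Int) (xs : List Int) : (pvGd s xs).length = xs.length - 1 := by
  simp [pvGd]

lemma pvGd_take (s : Int) (xs : List Int) (m : Nat) (h : m + 1 ≤ xs.length) :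
    ((pvGd s xs).take m).all id = true ↔ List.IsChain (pvR s) (xs.take (m + 1)) := by
  rw [pvAll_id_iff, List.isChain_iff_getElem]
  have hg := pvGd_length s xs
  have hlt : (List.take m (pvGd s xs)).length = m := by rw [List.length_take]; omega
  have hxt : (List.take (m + 1) xs).length = m + 1 := by rw [List.length_take]; omega
  constructor
  · intro hyp j hj
    rw [hxt] at hj
    have t := hyp j (by omega)
    rw [List.getElem_take, pvGd_getElem s xs j (by omega), decide_eq_true_eq] at t
    simpa only [List.getElem_take] using t
  · intro hyp j hj
    rw [hlt] at hj
    have t := hyp j (by omega)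
    rw [List.getElem_take, pvGd_getElem s xs j (by omega), decide_eq_true_eq]
    simpa only [List.getElem_take] using t

lemma pvGd_drop (s : Int) (xs : List Int) (k : Nat) :
    ((pvGd s xs).drop k).all id = true ↔ List.IsChain (pvR s) (xs.drop k) := by
  rw [pvAll_id_iff, List.isChain_iff_getElem]
  have hg := pvGd_length s xs
  constructor
  · intro hyp j hj
    rw [List.length_drop] at hj
    have t := hyp j (by rw [List.length_drop]; omega)
    rw [List.getElem_drop, pvGd_getElem s xs (k + j) (by omega), decide_eq_true_eq] at t
    simp only [List.getElem_drop]
    have e1 : k + (j + 1) = k + j + 1 := by omega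
    simpa only [e1] using t
  · intro hyp j hj
    rw [List.length_drop, hg] at hj
    have t := hyp j (by rw [List.length_drop]; omega)
    rw [List.getElem_drop, pvGd_getElem s xs (k + j) (by omega), decide_eq_true_eq]
    simp only [List.getElem_drop] at t
    have e1 : k + (j + 1) = k + j + 1 := by omega
    simpa only [e1] using t

lemma pvPrefixes_foldl (gs : List Bool) : ∀ (out : List Bool) (a : Bool),
    gs.foldl (fun st g => (st.1 ++ [st.2 && g], st.2 && g)) (out, a)
      = (out ++ (List.range gs.length).map (fun i => a && (gs.take (i + 1)).all id), a && gs.all id) := by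
  induction gs with
  | nil => intro out a; simp
  | cons g gs ih =>
    intro out a
    rw [List.foldl_cons, ih (out ++ [a && g]) (a && g)]
    simp only [List.length_cons, List.range_succ_eq_map, List.map_cons, List.map_map]
    simp [Function.comp, List.take_succ_cons, List.all_cons, Bool.and_assoc, List.append_assoc]

lemma pvPrefixes_getD (gs : List Bool) (i : Nat) (h : i ≤ gs.length) :
    (pvPrefixes gs).getD i false = (gs.take i).all id := by
  rw [pvPrefixes, pvPrefixes_foldl gs [true] true]
  simp only [Bool.true_and]
  cases i with
  | zero => simp
  | succ k =>
    have : ([true] ++ (List.range gs.length).map (fun i => (gs.take (i + 1)).all id)).getD (k + 1) false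
        = ((List.range gs.length).map (fun i => (gs.take (i + 1)).all id)).getD k false := by
      simp
    rw [this, PySem.List.getD_map_range _ _ _ _ (by omega)]

lemma pvAll_pairs (p : Int → Int → Bool) (xs : List Int) :
    ((PySem.List.pyRange 0 ((xs.length : Int) - 1) 1).all
      (fun j => p (PySem.List.pyGetD xs j 0) (PySem.List.pyGetD xs (j + 1) 0))) = true
    ↔ List.IsChain (fun a b => p a b = true) xs := by
  rw [PySem.List.pyRange_one, List.all_map, List.all_eq_true, List.isChain_iff_getElem]
  have ht : ((xs.length : Int) - 1 - 0).toNat = xs.length - 1 := by omega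
  rw [ht]
  constructor
  · intro hyp j hj
    have t := hyp j (List.mem_range.2 (by omega))
    simp only [Function.comp_apply, zero_add] at t
    have e1 : ((j : Int) + 1) = ((j + 1 : Nat) : Int) := by omega
    rw [e1, PySem.List.pyGetD_natCast, PySem.List.pyGetD_natCast,
        List.getD_eq_getElem _ _ (by omega), List.getD_eq_getElem _ _ (by omega)] at t
    exact t
  · intro hyp j hj
    have hj' := List.mem_range.1 hj
    simp only [Function.comp_apply, zero_add]
    have e1 : ((j : Int) + 1) = ((j + 1 : Nat) : Int) := by omega
    rw [e1, PySem.List.pyGetD_natCast, PySem.List.pyGetD_natCast,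
        List.getD_eq_getElem _ _ (by omega), List.getD_eq_getElem _ _ (by omega)]
    exact hyp j (by omega)

lemma pvCond_iff (xs : List Int) :
    ((List.IsChain (fun a b : Int => decide (a < b) = true) xs ∨
      List.IsChain (fun a b : Int => decide (a > b) = true) xs) ∧
      List.IsChain (fun a b : Int => decide (1 ≤ |a - b| ∧ |a - b| ≤ 3) = true) xs)
    ↔ (List.IsChain (pvR 1) xs ∨ List.IsChain (pvR (-1)) xs) := by
  simp only [List.isChain_iff_getElem, decide_eq_true_eq]
  constructor
  · rintro ⟨h | h, hv⟩
    · left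
      intro i hi
      have h1 := h i hi
      have h2 := hv i hi
      simp only [pvR, one_mul]
      rcases abs_cases (xs[i] - xs[i + 1]) with ⟨e1, _⟩ | ⟨e1, _⟩ <;> omega
    · right
      intro i hi
      have h1 := h i hi
      have h2 := hv i hi
      simp only [pvR, neg_mul, one_mul]
      rcases abs_cases (xs[i] - xs[i + 1]) with ⟨e1, _⟩ | ⟨e1, _⟩ <;> omega
  · rintro (h | h)
    · refine ⟨Or.inl fun i hi => ?_, fun i hi => ?_⟩ <;>
        · have h1 := h i hi
          simp only [pvR, one_mul] at h1
          first
          | omega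
          | · rcases abs_cases (xs[i] - xs[i + 1]) with ⟨e1, _⟩ | ⟨e1, _⟩ <;> omega
    · refine ⟨Or.inr fun i hi => ?_, fun i hi => ?_⟩ <;>
        · have h1 := h i hi
          simp only [pvR, neg_mul, one_mul] at h1
          first
          | omega
          | · rcases abs_cases (xs[i] - xs[i + 1]) with ⟨e1, _⟩ | ⟨e1, _⟩ <;> omega

lemma pvA_eq (level : List Int) :
    check_level_two level
      = ((List.range level.length).countP (fun i => decide (pvC 1 level i ∨ pvC (-1) level i)) : Int) := by
  unfold check_level_two
  simp only [PySem.List.len_eq]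
  rw [PySem.List.pyRange_one, List.foldl_map]
  have ht : ((level.length : Int) - 0).toNat = level.length := by omega
  rw [ht]
  refine Eq.trans (PySem.List.foldl_congr_mem (List.range level.length) _
      (fun (c : Int) (k : Nat) => if decide (pvC 1 level k ∨ pvC (-1) level k) = true then c + 1 else c)
      0 ?_) ?_
  swap
  · rw [PySem.List.foldl_if_add_one, zero_add]
  · intro c k hk
    have hk' := List.mem_range.1 hk
    simp only [zero_add]
    refine if_congr ?_ rfl rfl
    have e1 : ((k : Int) + 1) = ((k + 1 : Nat) : Int) := by omega
    rw [e1, PySem.List.slice_to_natCast, PySem.List.slice_from_natCast]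
    rw [Bool.and_eq_true, Bool.or_eq_true]
    rw [show List.take k level ++ List.drop (k + 1) level = pvRem level k from rfl]
    rw [pvAll_pairs (fun a b => decide (a < b)) (pvRem level k),
        pvAll_pairs (fun a b => decide (a > b)) (pvRem level k),
        pvAll_pairs (fun a b => decide (1 ≤ |a - b| ∧ |a - b| ≤ 3)) (pvRem level k),
        decide_eq_true_eq]
    exact pvCond_iff (pvRem level k)

lemma pvB_dir (level : List Int) (s : Int) (c : Int) (h : 3 ≤ level.length) :
    pvCountDir level s c
      = c + ((List.range level.length).countP (fun i => decide (pvC s level i)) : Int) := by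
  unfold pvCountDir
  simp only [PySem.List.len_eq, PySem.List.slice?_none_none_neg_one, Option.getD_some]
  rw [PySem.List.pyRange_one 0 ((level.length : Int) - 1)]
  rw [show (((level.length : Int) - 1 - 0).toNat) = level.length - 1 from by omega]
  rw [List.map_map]
  rw [List.map_congr_left (l := List.range (level.length - 1))
      (g := fun j => decide (pvR s (level.getD j 0) (level.getD (j + 1) 0))) ?hg]
  case hg =>
    intro k hk
    have hk' := List.mem_range.1 hk
    simp only [Function.comp_apply, zero_add]
    rw [show ((k : Int) + 1) = ((k + 1 : Nat) : Int) from by omega,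
        PySem.List.pyGetD_natCast, PySem.List.pyGetD_natCast]
  rw [show (List.range (level.length - 1)).map (fun j => decide (pvR s (level.getD j 0) (level.getD (j + 1) 0))) = pvGd s level from rfl]
  have e2 : ((level.length : Int) - 2) = ((level.length - 2 : Nat) : Int) := by omega
  have hb0 : PySem.List.pyGetD (pvPrefixes (pvGd s level).reverse) ((level.length : Int) - 2) false
      = decide (pvC s level 0) := by
    rw [e2, PySem.List.pyGetD_natCast,
        pvPrefixes_getD _ _ (by rw [List.length_reverse, pvGd_length]; omega),
        List.take_reverse, pvGd_length,
        show level.length - 1 - (level.length - 2) = 1 from by omega,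
        List.all_reverse, Bool.eq_iff_iff, pvGd_drop, decide_eq_true_eq]
    exact (pvC_zero s level).symm
  have hbLast : PySem.List.pyGetD (pvPrefixes (pvGd s level)) ((level.length : Int) - 2) false
      = decide (pvC s level (level.length - 1)) := by
    rw [e2, PySem.List.pyGetD_natCast,
        pvPrefixes_getD _ _ (by rw [pvGd_length]; omega),
        Bool.eq_iff_iff, pvGd_take s level (level.length - 2) (by omega),
        show level.length - 2 + 1 = level.length - 1 from by omega, decide_eq_true_eq]
    exact (pvC_last s level (by omega)).symm
  rw [hb0, hbLast]
  rw [PySem.List.pyRange_one 1 ((level.length : Int) - 1),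
      show (((level.length : Int) - 1 - 1).toNat) = level.length - 2 from by omega,
      List.foldl_map]
  refine Eq.trans (PySem.List.foldl_congr_mem (List.range (level.length - 2)) _
      (fun (c : Int) (k : Nat) => if decide (pvC s level (k + 1)) = true then c + 1 else c) _ ?_) ?_
  · intro c2 k hk
    have hk' := List.mem_range.1 hk
    refine if_congr ?_ rfl rfl
    rw [show (1 + (k : Int) - 1) = ((k : Nat) : Int) from by omega,
        show ((level.length : Int) - 2 - (1 + (k : Int))) = ((level.length - 3 - k : Nat) : Int) from by omega,
        show (1 + (k : Int) + 1) = ((k + 2 : Nat) : Int) from by omega]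
    simp only [PySem.List.pyGetD_natCast]
    rw [pvPrefixes_getD _ _ (by rw [pvGd_length]; omega),
        pvPrefixes_getD _ _ (by rw [List.length_reverse, pvGd_length]; omega),
        List.take_reverse, pvGd_length,
        show level.length - 1 - (level.length - 3 - k) = k + 2 from by omega,
        List.all_reverse]
    rw [Bool.and_eq_true, Bool.and_eq_true, decide_eq_true_eq, decide_eq_true_eq]
    rw [pvGd_take s level k (by omega), pvGd_drop,
        pvC_mid s level (k + 1) (by omega) (by omega)]
    simp only [Nat.add_sub_cancel]
    rw [and_assoc]
  · rw [PySem.List.foldl_if_add_one]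
    have hsplit : (List.range level.length).countP (fun i => decide (pvC s level i))
        = ((if decide (pvC s level 0) = true then 1 else 0)
            + (List.range (level.length - 2)).countP (fun k => decide (pvC s level (k + 1)))
            + (if decide (pvC s level (level.length - 1)) = true then 1 else 0)) := by
      conv_lhs => rw [show level.length = level.length - 2 + 1 + 1 from by omega]
      rw [List.range_succ, List.countP_append, List.range_succ_eq_map, List.countP_cons,
          List.countP_map, List.countP_cons, List.countP_nil,
          show level.length - 2 + 1 = level.length - 1 from by omega]
      have : ((fun i => decide (pvC s level i)) ∘ Nat.succ)
          = (fun k => decide (pvC s level (k + 1))) := rfl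
      rw [this]
      omega
    rw [hsplit]
    split_ifs <;> push_cast <;> omega

-- ===== VERDICT (by name: the statement is the Claim_ definition above) =====
theorem check_level_two_spec : Claim_equal_check_level_two := by
  intro level _dom
  unfold Spec_check_level_two
  rw [pvA_eq]
  unfold check_level_two_alt
  simp only [PySem.List.len_eq]
  by_cases hn : (level.length : Int) ≤ 2
  · rw [if_pos hn]
    have h2 : level.length ≤ 2 := by exact_mod_cast hn
    have : (List.range level.length).countP (fun i => decide (pvC 1 level i ∨ pvC (-1) level i))
        = level.length := by
      have := (List.countP_eq_length
          (p := fun i => decide (pvC 1 level i ∨ pvC (-1) level i))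
          (l := List.range level.length)).2
        (fun i hi => decide_eq_true (Or.inl (pvC_small 1 level h2 i (List.mem_range.1 hi))))
      rw [this, List.length_range]
    rw [this]
  · rw [if_neg hn]
    have h3 : 3 ≤ level.length := by omega
    simp only [List.foldl_cons, List.foldl_nil]
    rw [pvB_dir level 1 0 h3, pvB_dir level (-1) _ h3]
    rw [pvCountP_or (List.range level.length) (pvC 1 level) (pvC (-1) level)
        (fun i hi => pvC_not_both level h3 i (List.mem_range.1 hi))]
    push_cast
    ring
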